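-- pv_equiv track=rewrite | github.com/AbdullahBakir97/repodoc-ai | src/analyzers/scanners/file_parser.py | _parse_cargo_toml
-- ===== SOURCE A (Python) =====
-- from typing import Any
--
-- def _parse_cargo_toml(content: str) -> dict[str, Any]:
--     """Parse a Cargo.toml file.
--
--     Args:
--         content: Raw file content.
--
--     Returns:
--         Dict with name, version, description.
--     """
--     result: dict[str, Any] = {"name": "", "version": "", "description": ""}
--     current_section = ""
--
--     for line in content.splitlines():
--         stripped = line.strip()
--
--         if stripped.startswith("["):
--             current_section = stripped.strip("[]").strip()
--             continue
--
--         if "=" not in stripped: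
--             continue
--
--         key, _, value = stripped.partition("=")
--         key = key.strip()
--         value = value.strip().strip('"').strip("'")
--
--         if current_section == "package":
--             if key in result:
--                 result[key] = value
--
--     return result
-- ===== SOURCE B (Python) =====
-- def _parse_cargo_toml(content: str) -> dict:
--     """Block decomposition: split the stripped lines into (section, body) blocks,
--     concatenate the bodies of every [package] block, then answer each of the three
--     fields by an independent backward search (last assignment wins)."""
--     lines = [ln.strip() for ln in content.splitlines()]
--
--     # phase 1: cut the line list into blocks at header lines
--     blocks = []
--     name, body = "", []
--     for ln in lines:
--         if ln.startswith("["):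
--             blocks.append((name, body))
--             name, body = ln.strip("[]").strip(), []
--         else:
--             body.append(ln)
--     blocks.append((name, body))
--
--     # phase 2: the package region = concatenation of all [package] block bodies
--     pkg = [ln for sec, b in blocks if sec == "package" for ln in b]
--
--     # phase 3: per-field backward search for the last assignment
--     def last_value(field):
--         for ln in reversed(pkg):
--             if "=" in ln:
--                 k, _, v = ln.partition("=")
--                 if k.strip() == field:
--                     return v.strip().strip('"').strip("'")
--         return ""
--
--     return {f: last_value(f) for f in ("name", "version", "description")}
-- ===== Notes on version B (the rewrite author's own statement) =====
-- stated objective: alternative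
-- what changed: B works in three separate phases with different intermediate structures: it cuts the stripped lines into (section, body) blocks, concatenates the bodies of every [package] block, and then answers each of the three fields by an independent backward search for the last assignment, instead of A's single forward pass that updates a result dict while tracking the current section.
import Mathlib
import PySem

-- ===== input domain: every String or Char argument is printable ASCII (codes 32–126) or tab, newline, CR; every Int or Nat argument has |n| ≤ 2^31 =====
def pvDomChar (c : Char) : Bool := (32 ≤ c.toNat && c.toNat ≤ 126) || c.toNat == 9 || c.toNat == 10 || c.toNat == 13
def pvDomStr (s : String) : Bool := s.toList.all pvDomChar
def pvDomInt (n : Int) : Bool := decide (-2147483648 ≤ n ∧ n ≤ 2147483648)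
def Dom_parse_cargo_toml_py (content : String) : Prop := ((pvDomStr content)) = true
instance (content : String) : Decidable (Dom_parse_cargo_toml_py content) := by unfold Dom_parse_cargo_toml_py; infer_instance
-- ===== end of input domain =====

-- B replaces A's single stateful pass (writing a result dict while scanning) by three phases:
-- cut the lines into (section, body) blocks, concatenate the [package] bodies, then answer each
-- field by an independent backward search for the last assignment; same result ('alternative').

-- str.partition("="): hand port, exact — (before first '=', after first '=') on the components
-- the code uses; Python's middle component is unused.
def pvPartitionEq (s : String) : String × String :=
  (String.ofList (s.toList.takeWhile (· ≠ '=')), String.ofList ((s.toList.dropWhile (· ≠ '=')).drop 1))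

-- value.strip().strip('"').strip("'"), used verbatim by both Pythons
def pvStripQuotes (s : String) : String :=
  PySem.Str.stripChars (PySem.Str.stripChars (PySem.Str.strip s) "\"") "'"

-- ===== PORT A =====
-- A's loop body after `stripped = line.strip()`; state = (result dict, current_section)
def pvStepS (st : PySem.Dict String String × String) (stripped : String) :
    PySem.Dict String String × String :=
  if PySem.Str.startswith stripped "[" then
    (st.1, PySem.Str.strip (PySem.Str.stripChars stripped "[]"))
  else if PySem.Str.isIn "=" stripped then
    let kv := pvPartitionEq stripped
    let key := PySem.Str.strip kv.1
    let value := pvStripQuotes kv.2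
    if st.2 == "package" then
      if st.1.contains key then (st.1.insert key value, st.2) else st
    else st
  else st

def pvStepA (st : PySem.Dict String String × String) (line : String) :
    PySem.Dict String String × String :=
  pvStepS st (PySem.Str.strip line)

def parse_cargo_toml_py (content : String) : List (String × String) :=
  let init : PySem.Dict String String :=
    ((PySem.Dict.empty.insert "name" "").insert "version" "").insert "description" ""
  ((PySem.Str.splitlines content).foldl pvStepA (init, "")).1.items

-- ===== PORT B =====
-- phase-1 loop body: state = (blocks, current block name, current block body)
def pvBlockStep (st : List (String × List String) × String × List String) (ln : String) :
    List (String × List String) × String × List String :=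
  if PySem.Str.startswith ln "[" then
    (st.1 ++ [(st.2.1, st.2.2)], PySem.Str.strip (PySem.Str.stripChars ln "[]"), [])
  else
    (st.1, st.2.1, st.2.2 ++ [ln])

-- phase 2, the comprehension `[ln for sec, b in blocks if sec == "package" for ln in b]`
def pvFlatPkg (blocks : List (String × List String)) : List String :=
  (blocks.filter (fun b => b.1 == "package")).flatMap (fun b => b.2)

-- phase-3 scan: `for ln in reversed(pkg)` ported as recursion over pkg.reverse
def pvLastValue (field : String) : List String → String
  | [] => ""
  | ln :: rest =>
    if PySem.Str.isIn "=" ln then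
      if PySem.Str.strip (pvPartitionEq ln).1 == field then pvStripQuotes (pvPartitionEq ln).2
      else pvLastValue field rest
    else pvLastValue field rest

def parse_cargo_toml_py_alt (content : String) : List (String × String) :=
  let lines := (PySem.Str.splitlines content).map PySem.Str.strip
  let st := lines.foldl pvBlockStep ([], "", [])
  let pkg := pvFlatPkg (st.1 ++ [(st.2.1, st.2.2)])
  [("name", pvLastValue "name" pkg.reverse),
   ("version", pvLastValue "version" pkg.reverse),
   ("description", pvLastValue "description" pkg.reverse)]

-- ===== PRECONDITION & SPEC =====
def Spec_parse_cargo_toml_py (content : String) (out : List (String × String)) : Prop := out = parse_cargo_toml_py_alt content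
instance (content : String) (out : List (String × String)) : Decidable (Spec_parse_cargo_toml_py content out) := by unfold Spec_parse_cargo_toml_py; infer_instance

-- ===== CLAIM =====
def Claim_equal_parse_cargo_toml_py : Prop := ∀ (content : String), Dom_parse_cargo_toml_py content → Spec_parse_cargo_toml_py content (parse_cargo_toml_py content)

-- ===== LEMMAS AND PROOFS =====

-- the key/value a stripped line assigns, if any
def pvKV (l : String) : Option (String × String) :=
  if PySem.Str.isIn "=" l then
    some (PySem.Str.strip (pvPartitionEq l).1, pvStripQuotes (pvPartitionEq l).2)
  else none

def pvMatch (field l : String) : Option String :=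
  match pvKV l with
  | some (k, v) => if k = field then some v else none
  | none => none

-- reference: the stripped lines lying in a [package] section, given the current section
def pvPkgOf (sec : String) : List String → List String
  | [] => []
  | l :: ls =>
    if PySem.Str.startswith l "[" then pvPkgOf (PySem.Str.strip (PySem.Str.stripChars l "[]")) ls
    else (if sec = "package" then [l] else []) ++ pvPkgOf sec ls

-- last assignment to `field` in the list, if any
def pvLast (field : String) : List String → Option String
  | [] => none
  | l :: ls =>
    match pvLast field ls with
    | some w => some w
    | none => pvMatch field l

-- first assignment to `field` in the list, if any
def pvFind (field : String) : List String → Option String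
  | [] => none
  | l :: ls =>
    match pvMatch field l with
    | some v => some v
    | none => pvFind field ls

theorem pvLastValue_eq_find (field : String) (xs : List String) :
    pvLastValue field xs = (pvFind field xs).getD "" := by
  induction xs with
  | nil => rfl
  | cons l ls ih =>
    simp only [pvLastValue, pvFind, pvMatch, pvKV]
    by_cases h : PySem.Str.isIn "=" l = true
    · simp only [h, if_true]
      by_cases hk : PySem.Str.strip (pvPartitionEq l).1 = field
      · simp [hk]
      · simp [hk, ih]
    · simp only [eq_false_of_ne_true h]
      simp [ih]

theorem pvFind_append (field : String) (as bs : List String) :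
    pvFind field (as ++ bs) =
      match pvFind field as with
      | some v => some v
      | none => pvFind field bs := by
  induction as with
  | nil => rfl
  | cons l ls ih =>
    simp only [List.cons_append, pvFind, ih]
    cases pvMatch field l <;> rfl

theorem pvFind_reverse (field : String) (xs : List String) :
    pvFind field xs.reverse = pvLast field xs := by
  induction xs with
  | nil => rfl
  | cons l ls ih =>
    simp only [List.reverse_cons, pvFind_append, ih, pvLast, pvFind]
    cases pvLast field ls <;> cases pvMatch field l <;> rfl

-- A-side invariant: the fold keeps, for each of the three keys, the last package assignment seen
theorem pvFoldA_inv (S : List String) (d : PySem.Dict String String) (sec a b c : String)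
    (h : d.items = [("name", a), ("version", b), ("description", c)]) :
    (S.foldl pvStepS (d, sec)).1.items =
      [("name", (pvLast "name" (pvPkgOf sec S)).getD a),
       ("version", (pvLast "version" (pvPkgOf sec S)).getD b),
       ("description", (pvLast "description" (pvPkgOf sec S)).getD c)] := by
  induction S generalizing d sec a b c with
  | nil => simp [pvPkgOf, pvLast, h]
  | cons l ls ih =>
    by_cases h1 : PySem.Chars.startswith l.toList ['['] = true
    · have hstep : pvStepS (d, sec) l =
          (d, PySem.Str.strip (PySem.Str.stripChars l "[]")) := by
        simp [pvStepS, h1]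
      have hpkg : pvPkgOf sec (l :: ls) =
          pvPkgOf (PySem.Str.strip (PySem.Str.stripChars l "[]")) ls := by
        simp [pvPkgOf, h1]
      rw [List.foldl_cons, hstep, ih _ _ _ _ _ h, hpkg]
    · by_cases h2 : PySem.Chars.isIn ['='] l.toList = true
      · have hkv : pvKV l = some (PySem.Str.strip (pvPartitionEq l).1, pvStripQuotes (pvPartitionEq l).2) := by
          simp [pvKV, h2]
        by_cases hs : sec = "package"
        · subst hs
          have hcont : d.contains (PySem.Str.strip (pvPartitionEq l).1) =
              decide (PySem.Str.strip (pvPartitionEq l).1 ∈ (["name", "version", "description"] : List String)) := by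
            rw [PySem.Dict.contains_eq_decide_mem_keys]
            simp [PySem.Dict.keys, h]
          have hpkg : pvPkgOf "package" (l :: ls) = l :: pvPkgOf "package" ls := by
            simp [pvPkgOf, h1]
          by_cases hk1 : PySem.Str.strip (pvPartitionEq l).1 = "name"
          · have hc : d.contains "name" = true := by
              rw [hk1] at hcont; rw [hcont]; decide
            have hins : (d.insert "name" (pvStripQuotes (pvPartitionEq l).2)).items =
                [("name", pvStripQuotes (pvPartitionEq l).2), ("version", b), ("description", c)] := by
              rw [PySem.Dict.items_insert]
              simp [hc, h]
            have hstep : pvStepS (d, "package") l =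
                (d.insert "name" (pvStripQuotes (pvPartitionEq l).2), "package") := by
              simp [pvStepS, h1, h2, hk1, hc]
            rw [List.foldl_cons, hstep, ih _ _ _ _ _ hins, hpkg]
            simp only [pvLast, pvMatch, hkv, hk1]
            cases pvLast "name" (pvPkgOf "package" ls) <;>
              cases pvLast "version" (pvPkgOf "package" ls) <;>
              cases pvLast "description" (pvPkgOf "package" ls) <;> simp
          · by_cases hk2 : PySem.Str.strip (pvPartitionEq l).1 = "version"
            · have hc : d.contains "version" = true := by
                rw [hk2] at hcont; rw [hcont]; decide
              have hins : (d.insert "version" (pvStripQuotes (pvPartitionEq l).2)).items =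
                  [("name", a), ("version", pvStripQuotes (pvPartitionEq l).2), ("description", c)] := by
                rw [PySem.Dict.items_insert]
                simp [hc, h]
              have hstep : pvStepS (d, "package") l =
                  (d.insert "version" (pvStripQuotes (pvPartitionEq l).2), "package") := by
                simp [pvStepS, h1, h2, hk2, hc]
              rw [List.foldl_cons, hstep, ih _ _ _ _ _ hins, hpkg]
              simp only [pvLast, pvMatch, hkv, hk2]
              cases pvLast "name" (pvPkgOf "package" ls) <;>
                cases pvLast "version" (pvPkgOf "package" ls) <;>
                cases pvLast "description" (pvPkgOf "package" ls) <;> simp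
            · by_cases hk3 : PySem.Str.strip (pvPartitionEq l).1 = "description"
              · have hc : d.contains "description" = true := by
                  rw [hk3] at hcont; rw [hcont]; decide
                have hins : (d.insert "description" (pvStripQuotes (pvPartitionEq l).2)).items =
                    [("name", a), ("version", b), ("description", pvStripQuotes (pvPartitionEq l).2)] := by
                  rw [PySem.Dict.items_insert]
                  simp [hc, h]
                have hstep : pvStepS (d, "package") l =
                    (d.insert "description" (pvStripQuotes (pvPartitionEq l).2), "package") := by
                  simp [pvStepS, h1, h2, hk3, hc]
                rw [List.foldl_cons, hstep, ih _ _ _ _ _ hins, hpkg]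
                simp only [pvLast, pvMatch, hkv, hk3]
                cases pvLast "name" (pvPkgOf "package" ls) <;>
                  cases pvLast "version" (pvPkgOf "package" ls) <;>
                  cases pvLast "description" (pvPkgOf "package" ls) <;> simp
              · have hc : d.contains (PySem.Str.strip (pvPartitionEq l).1) = false := by
                  rw [hcont]; simp [hk1, hk2, hk3]
                have hstep : pvStepS (d, "package") l = (d, "package") := by
                  simp [pvStepS, h1, h2, hc]
                rw [List.foldl_cons, hstep, ih _ _ _ _ _ h, hpkg]
                simp only [pvLast, pvMatch, hkv]
                cases pvLast "name" (pvPkgOf "package" ls) <;>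
                  cases pvLast "version" (pvPkgOf "package" ls) <;>
                  cases pvLast "description" (pvPkgOf "package" ls) <;> simp [hk1, hk2, hk3]
        · have hstep : pvStepS (d, sec) l = (d, sec) := by
            simp [pvStepS, h1, h2, hs]
          have hpkg : pvPkgOf sec (l :: ls) = pvPkgOf sec ls := by
            simp [pvPkgOf, h1, hs]
          rw [List.foldl_cons, hstep, ih _ _ _ _ _ h, hpkg]
      · have hstep : pvStepS (d, sec) l = (d, sec) := by
          simp [pvStepS, h1, h2]
        have hm : ∀ field, pvMatch field l = none := by
          intro field; simp [pvMatch, pvKV, h2]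
        rw [List.foldl_cons, hstep, ih _ _ _ _ _ h]
        by_cases hs : sec = "package"
        · subst hs
          have hpkg : pvPkgOf "package" (l :: ls) = l :: pvPkgOf "package" ls := by
            simp [pvPkgOf, h1]
          rw [hpkg]
          simp only [pvLast, hm]
          cases pvLast "name" (pvPkgOf "package" ls) <;>
            cases pvLast "version" (pvPkgOf "package" ls) <;>
            cases pvLast "description" (pvPkgOf "package" ls) <;> simp
        · simp [pvPkgOf, h1, hs]

-- B-side: the block fold's package bodies are exactly pvPkgOf
theorem pvFoldB_inv (S : List String) (blocks : List (String × List String))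
    (name : String) (body : List String) :
    pvFlatPkg ((S.foldl pvBlockStep (blocks, name, body)).1 ++
        [(S.foldl pvBlockStep (blocks, name, body)).2]) =
      pvFlatPkg blocks ++ (if name = "package" then body else []) ++ pvPkgOf name S := by
  induction S generalizing blocks name body with
  | nil =>
    by_cases hs : name = "package" <;> simp [pvFlatPkg, pvPkgOf, hs, List.filter_append]
  | cons l ls ih =>
    by_cases h1 : PySem.Chars.startswith l.toList ['['] = true
    · have hstep : pvBlockStep (blocks, name, body) l =
          (blocks ++ [(name, body)], PySem.Str.strip (PySem.Str.stripChars l "[]"), []) := by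
        simp [pvBlockStep, h1]
      rw [List.foldl_cons, hstep, ih]
      by_cases hs : name = "package" <;>
        simp [pvFlatPkg, pvPkgOf, h1, hs, List.filter_append, List.append_assoc]
    · have hstep : pvBlockStep (blocks, name, body) l = (blocks, name, body ++ [l]) := by
        simp [pvBlockStep, h1]
      rw [List.foldl_cons, hstep, ih]
      by_cases hs : name = "package" <;> simp [pvPkgOf, h1, hs, List.append_assoc]

-- ===== VERDICT =====
theorem parse_cargo_toml_py_spec : Claim_equal_parse_cargo_toml_py := by
  intro content _
  unfold Spec_parse_cargo_toml_py parse_cargo_toml_py parse_cargo_toml_py_alt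
  have hmap : (PySem.Str.splitlines content).foldl pvStepA
      ((((PySem.Dict.empty.insert "name" "").insert "version" "").insert "description" ""), "") =
      ((PySem.Str.splitlines content).map PySem.Str.strip).foldl pvStepS
      ((((PySem.Dict.empty.insert "name" "").insert "version" "").insert "description" ""), "") := by
    rw [List.foldl_map]
    rfl
  have hA := pvFoldA_inv ((PySem.Str.splitlines content).map PySem.Str.strip)
    ((((PySem.Dict.empty.insert "name" "").insert "version" "").insert "description" ""))
    "" "" "" "" (by decide)
  have hB := pvFoldB_inv ((PySem.Str.splitlines content).map PySem.Str.strip) [] "" []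
  simp only [pvFlatPkg, List.filter_nil, List.flatMap_nil, List.nil_append] at hB
  simp only [hmap, hA]
  simp only [pvFlatPkg]
  rw [hB]
  simp [pvLastValue_eq_find, pvFind_reverse]
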